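-- pv_equiv track=rewrite | github.com/ybsk00/RAG-Chatbot-System | rag/safety.py | validate_history
-- ===== SOURCE A (Python) =====
-- from typing import List, Dict
--
-- def validate_history(history) -> List[Dict]:
--     """대화 이력을 검증하고 정리합니다."""
--     if not isinstance(history, list):
--         return []
--     validated = []
--     for item in history:
--         if isinstance(item, dict) and "role" in item and "content" in item:
--             role = item["role"] if item["role"] in ("user", "model") else "user"
--             content = str(item.get("content", ""))[:2000]
--             validated.append({"role": role, "content": content})
--     return validated[-10:]
-- ===== SOURCE B (Python) =====
-- def validate_history(history):
--     """Reverse scan collecting at most 10 valid entries, with early exit; then restore order."""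
--     if not isinstance(history, list):
--         return []
--
--     def _clean(item):
--         if isinstance(item, dict) and "role" in item and "content" in item:
--             role = item["role"] if item["role"] in ("user", "model") else "user"
--             return {"role": role, "content": str(item.get("content", ""))[:2000]}
--         return None
--
--     picked = []
--     for item in reversed(history):
--         if len(picked) == 10:
--             break
--         entry = _clean(item)
--         if entry is not None:
--             picked.append(entry)
--     picked.reverse()
--     return picked
-- ===== Notes on version B (the rewrite author's own statement) =====
-- stated objective: alternative
-- what changed: B scans the history back-to-front with a per-item _clean helper, stops as soon as 10 valid entries are collected, and reverses the result, instead of A's forward pass building the whole validated list and slicing [-10:].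
import Mathlib
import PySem

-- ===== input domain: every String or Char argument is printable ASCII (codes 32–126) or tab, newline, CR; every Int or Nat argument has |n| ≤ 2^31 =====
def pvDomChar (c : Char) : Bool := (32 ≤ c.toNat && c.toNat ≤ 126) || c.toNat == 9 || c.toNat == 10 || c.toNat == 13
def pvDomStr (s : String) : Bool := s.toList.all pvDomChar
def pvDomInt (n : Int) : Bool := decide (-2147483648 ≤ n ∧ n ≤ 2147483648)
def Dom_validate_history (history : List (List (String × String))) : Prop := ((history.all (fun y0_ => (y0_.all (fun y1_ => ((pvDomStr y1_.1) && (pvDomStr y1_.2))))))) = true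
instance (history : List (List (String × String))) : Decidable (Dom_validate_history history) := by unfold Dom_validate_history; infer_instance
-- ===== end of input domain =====

-- B reverse-scans the history with a per-item cleaning helper, stopping after 10 valid
-- entries, instead of A's forward pass over everything followed by a [-10:] slice
-- (alternative decomposition; same exact return value).

-- ===== PORT A =====
-- forward pass: append every cleaned valid item, then take the slice validated[-10:]
def validate_history (history : List (List (String × String))) : List (List (String × String)) :=
  let validated := history.foldl (fun validated item =>
    if (item.lookup "role").isSome && (item.lookup "content").isSome then
      let role := match item.lookup "role" with
        | some r => if r == "user" || r == "model" then r else "user"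
        | none => "user"  -- unreachable: guarded by the isSome check ("role" in item)
      let content := PySem.Str.slice ((item.lookup "content").getD "") none (some 2000)
      validated ++ [[("role", role), ("content", content)]]
    else validated) []
  PySem.List.slice validated (some (-10)) none

-- ===== PORT B =====
-- _clean: one item to its validated dict, or None
def bClean (item : List (String × String)) : Option (List (String × String)) :=
  if (item.lookup "role").isSome && (item.lookup "content").isSome then
    some [("role", match item.lookup "role" with
                   | some r => if r == "user" || r == "model" then r else "user"
                   | none => "user"),
          ("content", PySem.Str.slice ((item.lookup "content").getD "") none (some 2000))]
  else none

-- the reverse scan with early break once 10 entries are picked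
def bLoop : List (List (String × String)) → List (List (String × String)) → List (List (String × String))
  | [], picked => picked
  | item :: rest, picked =>
    if picked.length == 10 then picked
    else match bClean item with
      | some entry => bLoop rest (picked ++ [entry])
      | none => bLoop rest picked

def validate_history_alt (history : List (List (String × String))) : List (List (String × String)) :=
  (bLoop history.reverse []).reverse

-- ===== PRECONDITION & SPEC =====
def Spec_validate_history (history : List (List (String × String))) (out : List (List (String × String))) : Prop := out = validate_history_alt history
instance (history : List (List (String × String))) (out : List (List (String × String))) : Decidable (Spec_validate_history history out) := by unfold Spec_validate_history; infer_instance

-- ===== CLAIM (what is proved, stated in full; the proofs are below) =====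
def Claim_equal_validate_history : Prop := ∀ (history : List (List (String × String))), Dom_validate_history history → Spec_validate_history history (validate_history history)

-- ===== LEMMAS AND PROOFS =====

-- A's loop body is exactly "append bClean's output, if any"
theorem stepA_eq_bClean (acc : List (List (String × String))) (item : List (String × String)) :
    (if (item.lookup "role").isSome && (item.lookup "content").isSome then
      let role := match item.lookup "role" with
        | some r => if r == "user" || r == "model" then r else "user"
        | none => "user"
      let content := PySem.Str.slice ((item.lookup "content").getD "") none (some 2000)
      acc ++ [[("role", role), ("content", content)]]
    else acc) = acc ++ (bClean item).toList := by
  unfold bClean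
  split_ifs <;> simp

-- A's foldl builds acc ++ filterMap bClean
theorem foldA_eq_filterMap (l : List (List (String × String))) (acc : List (List (String × String))) :
    l.foldl (fun validated item =>
      if (item.lookup "role").isSome && (item.lookup "content").isSome then
        let role := match item.lookup "role" with
          | some r => if r == "user" || r == "model" then r else "user"
          | none => "user"
        let content := PySem.Str.slice ((item.lookup "content").getD "") none (some 2000)
        validated ++ [[("role", role), ("content", content)]]
      else validated) acc = acc ++ l.filterMap bClean := by
  induction l generalizing acc with
  | nil => simp
  | cons item rest ih =>
    rw [List.foldl_cons, stepA_eq_bClean, ih, List.filterMap_cons]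
    cases bClean item <;> simp

-- B's loop collects the first (10 - picked.length) cleaned items
theorem bLoop_eq_take (l : List (List (String × String))) (picked : List (List (String × String)))
    (h : picked.length ≤ 10) :
    bLoop l picked = picked ++ (l.filterMap bClean).take (10 - picked.length) := by
  induction l generalizing picked with
  | nil => simp [bLoop]
  | cons item rest ih =>
    rw [bLoop]
    by_cases hfull : picked.length = 10
    · simp [hfull]
    · have hlt : picked.length < 10 := lt_of_le_of_ne h hfull
      rw [if_neg (by simpa using hfull)]
      cases hc : bClean item with
      | none => dsimp only; rw [ih picked h, List.filterMap_cons, hc]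
      | some entry =>
        dsimp only
        rw [ih (picked ++ [entry]) (by simp; omega), List.filterMap_cons, hc]
        have : 10 - picked.length = (10 - (picked ++ [entry]).length) + 1 := by simp; omega
        rw [this, List.take_succ_cons]
        simp

-- ===== VERDICT (by name: the statement is the Claim_ definition above) =====
theorem validate_history_spec : Claim_equal_validate_history := by
  intro history _
  unfold Spec_validate_history validate_history validate_history_alt
  rw [foldA_eq_filterMap, bLoop_eq_take history.reverse [] (by simp)]
  simp only [List.nil_append, List.filterMap_reverse, List.take_reverse,
    List.reverse_reverse]
  rw [PySem.List.slice_from_neg_ofNat _ 10 (by omega)]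
  simp
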